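-- pv_equiv track=rewrite | github.com/AthulBabu232000/dsa | leetcode/492.constructRectangle.py | find_factors
-- ===== SOURCE A (Python) =====
-- def find_factors(n):
--     diff=n-1
--     finalPair=list()
--     finalPair.append([n,1])
--     for i in range(1,n//2+1):
--         pair=list()
--         if n%i==0:
--             pair.append(i)
--             pair.append(n//i)
--             if diff>abs(n//i - i):
--                 diff=abs(n//i - i)
--                 finalPair.append(pair)
--     return finalPair
-- ===== SOURCE B (Python) =====
-- def find_factors(n):
--     res = [[n, 1]]
--     i = 2
--     while i * i <= n:
--         if n % i == 0:
--             res.append([i, n // i])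
--         i += 1
--     return res
-- ===== Notes on version B (the rewrite author's own statement) =====
-- stated objective: faster
-- what changed: B replaces A's scan of all candidates up to n//2 (tracking a running minimum difference) by a single loop over candidate divisors up to isqrt(n), using the fact that every proper divisor below the square root strictly improves the difference and no divisor beyond it ever does.
import Mathlib
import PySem

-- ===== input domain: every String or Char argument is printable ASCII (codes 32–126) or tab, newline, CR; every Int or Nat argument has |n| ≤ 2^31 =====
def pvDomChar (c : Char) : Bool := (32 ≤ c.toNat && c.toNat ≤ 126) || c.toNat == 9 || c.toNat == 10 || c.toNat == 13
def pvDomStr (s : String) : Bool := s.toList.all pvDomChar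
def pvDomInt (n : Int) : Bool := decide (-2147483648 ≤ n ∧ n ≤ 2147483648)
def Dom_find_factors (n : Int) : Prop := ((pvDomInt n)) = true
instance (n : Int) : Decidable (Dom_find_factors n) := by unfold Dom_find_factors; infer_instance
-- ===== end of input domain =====

-- B scans only the candidate divisors up to isqrt(n) instead of A's whole range up to n//2
-- with a running minimum: every proper divisor below the square root strictly improves A's
-- diff and no divisor beyond it ever does (faster, measured).

-- ===== PORT A =====
def find_factors (n : Int) : List (List Int) :=
  ((PySem.List.pyRange 1 (PySem.Int.floordiv n 2 + 1) 1).foldl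
    (fun (st : Int × List (List Int)) i =>
      if PySem.Int.mod n i == 0 then
        let pair : List Int := [i, PySem.Int.floordiv n i]
        if st.1 > |PySem.Int.floordiv n i - i| then
          (|PySem.Int.floordiv n i - i|, st.2 ++ [pair])
        else st
      else st)
    (n - 1, [[n, 1]])).2

-- ===== PORT B =====
def pvBLoop (n i : Int) (res : List (List Int)) : List (List Int) :=
  if i * i ≤ n then
    pvBLoop n (i + 1)
      (if PySem.Int.mod n i == 0 then res ++ [[i, PySem.Int.floordiv n i]] else res)
  else res
termination_by (n + 1 - i).toNat
decreasing_by
  rename_i h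
  have hi : i ≤ i * i := by
    by_cases h0 : i ≤ 0
    · exact le_trans h0 (mul_self_nonneg i)
    · nlinarith
  omega

def find_factors_alt (n : Int) : List (List Int) := pvBLoop n 2 [[n, 1]]

-- ===== PRECONDITION & SPEC =====
def Spec_find_factors (n : Int) (out : List (List Int)) : Prop := out = find_factors_alt n
instance (n : Int) (out : List (List Int)) : Decidable (Spec_find_factors n out) := by unfold Spec_find_factors; infer_instance

-- ===== CLAIM (what is proved, stated in full; the proofs are below) =====
def Claim_equal_find_factors : Prop := ∀ (n : Int), Dom_find_factors n → Spec_find_factors n (find_factors n)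

-- ===== LEMMAS AND PROOFS =====

-- A's loop step and running-minimum state, named for the proofs
def pvStepA (n : Int) (st : Int × List (List Int)) (i : Int) : Int × List (List Int) :=
  if PySem.Int.mod n i == 0 then
    let pair : List Int := [i, PySem.Int.floordiv n i]
    if st.1 > |PySem.Int.floordiv n i - i| then
      (|PySem.Int.floordiv n i - i|, st.2 ++ [pair])
    else st
  else st

def pvPB (n i : Int) : Bool := (PySem.Int.mod n i == 0) && decide (i * i ≤ n)

-- A's diff after scanning 2..t
def pvDF (n t : Int) : Int :=
  (PySem.List.pyRange 2 (t + 1) 1).foldl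
    (fun d i => if PySem.Int.mod n i == 0 then min d |PySem.Int.floordiv n i - i| else d) (n - 1)

-- the improving pairs among 2..t
def pvLB (n t : Int) : List (List Int) :=
  ((PySem.List.pyRange 2 (t + 1) 1).filter (pvPB n)).map (fun i => [i, PySem.Int.floordiv n i])

theorem find_factors_eq (n : Int) :
    find_factors n =
      ((PySem.List.pyRange 1 (PySem.Int.floordiv n 2 + 1) 1).foldl (pvStepA n)
        (n - 1, [[n, 1]])).2 := rfl

-- generic min-fold bounds
theorem pvFold_le_init (p : Int → Bool) (g : Int → Int) :
    ∀ (l : List Int) (d : Int),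
      (l.foldl (fun d i => if p i then min d (g i) else d) d) ≤ d := by
  intro l
  induction l with
  | nil => intro d; simp
  | cons x xs ih =>
    intro d
    simp only [List.foldl_cons]
    by_cases hx : p x
    · simp only [hx, if_pos]
      exact le_trans (ih _) (min_le_left _ _)
    · simp only [hx, if_neg, Bool.false_eq_true, not_false_iff]
      exact ih d

theorem pvFold_le_mem (p : Int → Bool) (g : Int → Int) :
    ∀ (l : List Int) (d x : Int), x ∈ l → p x = true →
      (l.foldl (fun d i => if p i then min d (g i) else d) d) ≤ g x := by
  intro l
  induction l with
  | nil => intro d x hx; simp at hx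
  | cons y ys ih =>
    intro d x hx hpx
    simp only [List.foldl_cons]
    rcases List.mem_cons.mp hx with h | h
    · subst h
      simp only [hpx, if_pos]
      exact le_trans (pvFold_le_init p g ys _) (min_le_right _ _)
    · exact ih _ x h hpx

theorem pvFold_lt (p : Int → Bool) (g : Int → Int) (v : Int) :
    ∀ (l : List Int) (d : Int), v < d → (∀ x ∈ l, p x = true → v < g x) →
      v < l.foldl (fun d i => if p i then min d (g i) else d) d := by
  intro l
  induction l with
  | nil => intro d hd _; simpa using hd
  | cons x xs ih =>
    intro d hd hall
    simp only [List.foldl_cons]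
    by_cases hx : p x
    · simp only [hx, if_pos]
      exact ih _ (lt_min hd (hall x (List.mem_cons_self) hx)) fun y hy => hall y (List.mem_cons_of_mem _ hy)
    · simp only [hx, Bool.false_eq_true, if_neg, not_false_iff]
      exact ih _ hd fun y hy => hall y (List.mem_cons_of_mem _ hy)

-- arithmetic facts about exact divisors
theorem pvDiv_small (n i : Int) (hn : 2 ≤ n) (hi : 2 ≤ i) (hd : i ∣ n) (hs : i * i ≤ n) :
    i ≤ n / i ∧ n / i - i < n - 1 := by
  obtain ⟨b, hb⟩ := hd
  have hi0 : 0 < i := by omega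
  have hbv : n / i = b := by rw [hb]; exact Int.mul_ediv_cancel_left b (by omega)
  have hb0 : 0 < b := by nlinarith
  constructor
  · rw [hbv]; nlinarith
  · rw [hbv]; nlinarith

theorem pvDiv_decr (n i j : Int) (hn : 2 ≤ n) (hj : 2 ≤ j) (hji : j < i)
    (hdi : i ∣ n) (hdj : j ∣ n) (hs : i * i ≤ n) :
    n / i - i < n / j - j := by
  obtain ⟨b, hb⟩ := hdi
  obtain ⟨a, ha⟩ := hdj
  have hbv : n / i = b := by rw [hb]; exact Int.mul_ediv_cancel_left b (by omega)
  have hav : n / j = a := by rw [ha]; exact Int.mul_ediv_cancel_left a (by omega)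
  have hb0 : 0 < b := by nlinarith
  have hba : b < a := by nlinarith
  rw [hbv, hav]; omega

theorem pvDiv_cofactor (n i : Int) (hn : 2 ≤ n) (hi : 2 ≤ i) (hd : i ∣ n)
    (him : i * 2 ≤ n) (hs : n < i * i) :
    (n / i) ∣ n ∧ 2 ≤ n / i ∧ n / i < i ∧ n / (n / i) = i ∧ (n / i) * (n / i) ≤ n := by
  obtain ⟨b, hb⟩ := hd
  have hbv : n / i = b := by rw [hb]; exact Int.mul_ediv_cancel_left b (by omega)
  have hb2 : 2 ≤ b := by nlinarith
  have hbi : b < i := by nlinarith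
  refine ⟨?_, by omega, by omega, ?_, ?_⟩
  · rw [hbv, hb]; exact Dvd.intro_left i rfl
  · rw [hbv, hb, mul_comm]; exact Int.mul_ediv_cancel_left i (by omega)
  · rw [hbv]; nlinarith

-- step equation for pvDF
theorem pvDF_step (n t : Int) (ht : 1 ≤ t) :
    pvDF n (t + 1) =
      if PySem.Int.mod n (t + 1) == 0 then min (pvDF n t) |PySem.Int.floordiv n (t + 1) - (t + 1)|
      else pvDF n t := by
  unfold pvDF
  rw [PySem.List.pyRange_one_succ_right (by omega : (2:Int) ≤ t + 1), List.foldl_append]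
  simp

-- step equation for pvLB
theorem pvLB_step (n t : Int) (ht : 1 ≤ t) :
    pvLB n (t + 1) =
      pvLB n t ++ (if pvPB n (t + 1) then [[t + 1, PySem.Int.floordiv n (t + 1)]] else []) := by
  unfold pvLB
  rw [PySem.List.pyRange_one_succ_right (by omega : (2:Int) ≤ t + 1), List.filter_append, List.map_append]
  by_cases h : pvPB n (t + 1) <;> simp [h]

-- the invariant of A's loop over 2..t
theorem pvStA_inv (n : Int) (hn : 2 ≤ n) :
    ∀ (k : Nat), 1 + (k : Int) ≤ PySem.Int.floordiv n 2 →
      (PySem.List.pyRange 2 (1 + (k : Int) + 1) 1).foldl (pvStepA n) (n - 1, [[n, 1]]) =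
        (pvDF n (1 + (k : Int)), [[n, 1]] ++ pvLB n (1 + (k : Int))) := by
  intro k
  induction k with
  | zero =>
    intro _
    rw [show (1 : Int) + (0 : Nat) + 1 = 2 by norm_num, PySem.List.pyRange_one_eq_nil (by omega)]
    unfold pvDF pvLB
    rw [show (1 : Int) + (0 : Nat) + 1 = 2 by norm_num, PySem.List.pyRange_one_eq_nil (by omega)]
    simp
  | succ k ih =>
    intro hk
    set t : Int := 1 + (k : Int) with hts
    have htk : (1 : Int) + ((k : Nat) + 1 : Nat) = t + 1 := by push_cast; omega
    have ht1 : 1 ≤ t := by omega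
    have htm : t + 1 ≤ PySem.Int.floordiv n 2 := by push_cast at hk; omega
    have ihh := ih (by omega)
    rw [htk, PySem.List.pyRange_one_succ_right (by omega : (2:Int) ≤ t + 1), List.foldl_append, ihh]
    have hmul2 : (t + 1) * 2 ≤ n := (PySem.Int.le_floordiv_iff_mul_le (by omega)).mp htm
    have hfd : PySem.Int.floordiv n (t + 1) = n / (t + 1) :=
      PySem.Int.floordiv_eq_ediv_of_pos (by omega)
    rw [pvDF_step n t ht1, pvLB_step n t ht1]
    simp only [List.foldl_cons, List.foldl_nil]
    by_cases hdvd : (t + 1) ∣ n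
    · have hmod : (PySem.Int.mod n (t + 1) == 0) = true := by
        simp [PySem.Int.mod_eq_zero_iff_dvd, hdvd]
      by_cases hsq : (t + 1) * (t + 1) ≤ n
      · -- improving divisor: strictly below the running minimum
        have hsmall := pvDiv_small n (t + 1) hn (by omega) hdvd hsq
        have habs : |PySem.Int.floordiv n (t + 1) - (t + 1)| = n / (t + 1) - (t + 1) := by
          rw [hfd]; exact abs_of_nonneg (by omega)
        have hlt : |PySem.Int.floordiv n (t + 1) - (t + 1)| < pvDF n t := by
          rw [habs]
          apply pvFold_lt
          · omega
          · intro x hx hpx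
            have hxr := (PySem.List.mem_pyRange_one).mp hx
            have hxd : x ∣ n := by
              rw [← PySem.Int.mod_eq_zero_iff_dvd]
              simpa using hpx
            have hxsq : x * x ≤ n := by nlinarith
            have hxabs : |PySem.Int.floordiv n x - x| = n / x - x := by
              rw [PySem.Int.floordiv_eq_ediv_of_pos (by omega)]
              have hle := (pvDiv_small n x hn (by omega) hxd hxsq).1
              exact abs_of_nonneg (by omega)
            rw [hxabs]
            exact pvDiv_decr n (t + 1) x hn (by omega) (by omega) hdvd hxd hsq
        have hpb : pvPB n (t + 1) = true := by
          unfold pvPB; simp [hmod, hsq]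
        unfold pvStepA
        simp only [hmod, if_pos, hpb, gt_iff_lt, hlt]
        rw [min_eq_right (le_of_lt hlt)]
        simp
      · -- divisor beyond the square root: its cofactor was already scanned
        obtain ⟨hcd, hc2, hci, hcq, hcs⟩ :=
          pvDiv_cofactor n (t + 1) hn (by omega) hdvd hmul2 (by omega)
        have hcabs : |PySem.Int.floordiv n (t + 1) - (t + 1)| = (t + 1) - n / (t + 1) := by
          have h0 : n / (t + 1) - (t + 1) ≤ 0 := by omega
          rw [hfd, abs_of_nonpos h0]; ring
        have hge : pvDF n t ≤ |PySem.Int.floordiv n (t + 1) - (t + 1)| := by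
          have hmem : n / (t + 1) ∈ PySem.List.pyRange 2 (t + 1) 1 :=
            (PySem.List.mem_pyRange_one).mpr ⟨by omega, by omega⟩
          have hpc : (PySem.Int.mod n (n / (t + 1)) == 0) = true := by
            simp [PySem.Int.mod_eq_zero_iff_dvd, hcd]
          have := pvFold_le_mem (fun i => PySem.Int.mod n i == 0)
            (fun i => |PySem.Int.floordiv n i - i|) (PySem.List.pyRange 2 (t + 1) 1)
            (n - 1) (n / (t + 1)) hmem hpc
          calc pvDF n t ≤ |PySem.Int.floordiv n (n / (t + 1)) - n / (t + 1)| := this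
            _ = |PySem.Int.floordiv n (t + 1) - (t + 1)| := by
                rw [PySem.Int.floordiv_eq_ediv_of_pos (by omega : (0:Int) < n / (t + 1)), hcq,
                  hcabs]
                exact abs_of_nonneg (by omega)
        have hpb : pvPB n (t + 1) = false := by
          unfold pvPB; simp [hsq]
        unfold pvStepA
        simp only [hmod, if_pos, gt_iff_lt, not_lt.mpr hge, if_false, hpb]
        rw [min_eq_left hge]
        simp
    · have hmod : (PySem.Int.mod n (t + 1) == 0) = false := by
        simp [PySem.Int.mod_eq_zero_iff_dvd, hdvd]
      have hpb : pvPB n (t + 1) = false := by unfold pvPB; simp [hmod]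
      unfold pvStepA
      simp [hmod, hpb]

-- B's loop collects exactly the improving pairs of 2..n//2
theorem pvBLoop_eq (n : Int) (_hn : 2 ≤ n) :
    ∀ (fuel : Nat) (i : Int) (res : List (List Int)), 2 ≤ i →
      fuel = (PySem.Int.floordiv n 2 + 1 - i).toNat →
      pvBLoop n i res =
        res ++ ((PySem.List.pyRange i (PySem.Int.floordiv n 2 + 1) 1).filter (pvPB n)).map
          (fun j => [j, PySem.Int.floordiv n j]) := by
  intro fuel
  induction fuel with
  | zero =>
    intro i res hi hf
    have hbig : ¬ (i * i ≤ n) := by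
      intro hsq
      have : i ≤ PySem.Int.floordiv n 2 :=
        (PySem.Int.le_floordiv_iff_mul_le (by omega)).mpr (by nlinarith)
      omega
    rw [pvBLoop, if_neg hbig, PySem.List.pyRange_one_eq_nil (by omega)]
    simp
  | succ f ih =>
    intro i res hi hf
    by_cases hsq : i * i ≤ n
    · have him : i ≤ PySem.Int.floordiv n 2 :=
        (PySem.Int.le_floordiv_iff_mul_le (by omega)).mpr (by nlinarith)
      rw [pvBLoop, if_pos hsq,
        PySem.List.pyRange_one_cons (by omega : i < PySem.Int.floordiv n 2 + 1),
        ih (i + 1) _ (by omega) (by omega)]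
      by_cases hdvd : (PySem.Int.mod n i == 0)
      · have hpb : pvPB n i = true := by unfold pvPB; simp [hdvd, hsq]
        simp [hdvd, hpb]
      · have hpb : pvPB n i = false := by
          unfold pvPB
          simp only [Bool.and_eq_false_iff]
          left
          simpa using hdvd
        simp [hdvd, hpb]
    · rw [pvBLoop, if_neg hsq]
      have hnil : (PySem.List.pyRange i (PySem.Int.floordiv n 2 + 1) 1).filter (pvPB n) = [] := by
        apply List.filter_eq_nil_iff.mpr
        intro j hj
        have hjr := (PySem.List.mem_pyRange_one).mp hj
        have : ¬ (j * j ≤ n) := by nlinarith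
        unfold pvPB
        simp [this]
      rw [hnil]
      simp

-- ===== VERDICT (by name: the statement is the Claim_ definition above) =====
theorem find_factors_spec : Claim_equal_find_factors := by
  intro n _
  unfold Spec_find_factors find_factors_alt
  by_cases hn : 2 ≤ n
  · have hm1 : 1 ≤ PySem.Int.floordiv n 2 :=
      (PySem.Int.le_floordiv_iff_mul_le (by omega)).mpr (by omega)
    set m : Int := PySem.Int.floordiv n 2 with hm
    rw [find_factors_eq, PySem.List.pyRange_one_append 1 2 (m + 1) (by omega) (by omega),
      List.foldl_append, show PySem.List.pyRange 1 2 1 = [1] from PySem.List.pyRange_one_singleton 1]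
    have hstep1 : (pvStepA n) (n - 1, [[n, 1]]) 1 = (n - 1, [[n, 1]]) := by
      unfold pvStepA
      have h1 : (PySem.Int.mod n 1 == 0) = true := by
        simp
      have hf1 : PySem.Int.floordiv n 1 = n := by
        rw [PySem.Int.floordiv_eq_ediv_of_pos (by omega)]; exact Int.ediv_one n
      rw [h1, if_pos rfl, hf1]
      rw [abs_of_nonneg (by omega : (0:Int) ≤ n - 1)]
      simp
    simp only [List.foldl_cons, List.foldl_nil, hstep1]
    have hk : 1 + ((m - 1).toNat : Int) = m := by omega
    have hinv := pvStA_inv n hn (m - 1).toNat (by omega)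
    rw [hk] at hinv
    rw [hinv, pvBLoop_eq n hn (m + 1 - 2).toNat 2 [[n, 1]] (by omega) (by omega)]
    rfl
  · rw [find_factors_eq, PySem.List.pyRange_one_eq_nil ?hle, pvBLoop, if_neg (by omega)]
    case hle =>
      have : PySem.Int.floordiv n 2 < 1 :=
        (PySem.Int.floordiv_lt_iff_lt_mul (by omega)).mpr (by omega)
      omega
    simp
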